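-- pv_equiv track=rewrite | github.com/zmq175/mais_art_journal | core/utils/size_utils.py | parse_pixel_size
-- ===== SOURCE A (Python) =====
-- from typing import Tuple, Optional, Dict
--
-- def parse_pixel_size(size: str, default_width: int = 1024, default_height: int = 1024) -> Tuple[int, int]:
--     """解析像素尺寸字符串
--
--     支持格式：
--     - "1024x1024"
--     - "1024*1024"
--     - "1024X1024"
--
--     Args:
--         size: 尺寸字符串
--         default_width: 解析失败时的默认宽度
--         default_height: 解析失败时的默认高度
--
--     Returns:
--         (width, height) 元组
--     """
--     if not size or not isinstance(size, str):
--         return default_width, default_height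
--
--     size_lower = size.lower().strip()
--
--     # 尝试解析 "WxH" 或 "W*H" 格式
--     for separator in ['x', '*']:
--         if separator in size_lower:
--             try:
--                 parts = size_lower.split(separator)
--                 if len(parts) == 2:
--                     width = int(parts[0].strip())
--                     height = int(parts[1].strip())
--                     if width > 0 and height > 0:
--                         return width, height
--             except (ValueError, IndexError):
--                 pass
--
--     return default_width, default_height
-- ===== SOURCE B (Python) =====
-- def parse_pixel_size(size: str, default_width: int = 1024, default_height: int = 1024):
--     """Single-pass scanner: split on 'x'/'*' in one sweep instead of per-separator membership test + split."""
--     if not size or not isinstance(size, str):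
--         return default_width, default_height
--
--     t = size.lower().strip()
--
--     parts = []
--     cur = []
--     for ch in t:
--         if ch == 'x' or ch == '*':
--             parts.append(''.join(cur))
--             cur = []
--         else:
--             cur.append(ch)
--     parts.append(''.join(cur))
--
--     if len(parts) == 2:
--         try:
--             width = int(parts[0].strip())
--             height = int(parts[1].strip())
--             if width > 0 and height > 0:
--                 return width, height
--         except ValueError:
--             pass
--
--     return default_width, default_height
-- ===== Notes on version B (the rewrite author's own statement) =====
-- stated objective: alternative
-- what changed: B replaces A's per-separator loop (a membership test and then a str.split for each of the two separator characters) with a single left-to-right scan that cuts the string at every separator character in one pass and then parses the two pieces once.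
import Mathlib
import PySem

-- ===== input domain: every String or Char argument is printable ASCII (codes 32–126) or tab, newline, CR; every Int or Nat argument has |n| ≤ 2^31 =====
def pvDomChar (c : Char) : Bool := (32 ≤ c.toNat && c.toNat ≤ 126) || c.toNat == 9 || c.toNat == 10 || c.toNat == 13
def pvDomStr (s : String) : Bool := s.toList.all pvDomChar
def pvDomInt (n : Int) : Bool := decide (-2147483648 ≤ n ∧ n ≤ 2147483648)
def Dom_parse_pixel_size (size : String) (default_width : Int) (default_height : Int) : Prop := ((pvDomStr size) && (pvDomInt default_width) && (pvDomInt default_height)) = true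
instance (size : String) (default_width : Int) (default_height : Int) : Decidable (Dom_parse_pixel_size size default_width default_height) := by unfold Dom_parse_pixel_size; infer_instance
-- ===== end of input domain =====

-- B differs from A only in mechanism: one left-to-right scan that cuts the string at every
-- separator character, instead of A's per-separator membership test + split; same value everywhere.

-- ---- shared helper: int(s), ported BY HAND, step for step (CPython's rule: strip the int()
-- whitespace, optional single sign, decimal digits with a single '_' allowed only between
-- digits); exact on the stated ASCII domain (checked by the differential test).
def pyIntGo : List Char → Bool → Nat → Option Nat
  | [], afterDigit, acc => if afterDigit = true then some acc else none
  | c :: rest, afterDigit, acc =>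
    if c.isDigit = true then pyIntGo rest true (acc * 10 + (c.toNat - '0'.toNat))
    else
      if c = '_' ∧ afterDigit = true then
        match rest with
        | d :: _tail => if d.isDigit = true then pyIntGo rest false acc else none
        | [] => none
      else none

def pyIntDigits? : List Char → Option Nat
  | [] => none
  | c :: rest => pyIntGo (c :: rest) false 0

def pyIntOfChars? (s : List Char) : Option Int :=
  match (List.dropWhile PySem.Int.isIntSpace (List.dropWhile PySem.Int.isIntSpace s).reverse).reverse with
  | [] => none
  | a :: rest =>
    if a = '-' then (pyIntDigits? rest).map (fun n => -(n : Int))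
    else if a = '+' then (pyIntDigits? rest).map (fun n => (n : Int))
    else (pyIntDigits? (a :: rest)).map (fun n => (n : Int))

-- ===== PORT A =====
-- one iteration of the body of A's loop over the two separator characters:
-- membership test, split, length-2 check, parse both pieces, positivity check
def ppsTry (t : List Char) (sep : Char) : Option (Int × Int) :=
  if PySem.Chars.isIn [sep] t = true then
    let parts := PySem.Chars.splitOn t [sep]
    if parts.length = 2 then
      match pyIntOfChars? (PySem.Chars.strip (parts.getD 0 [])),
            pyIntOfChars? (PySem.Chars.strip (parts.getD 1 [])) with
      | some w, some h => if w > 0 ∧ h > 0 then some (w, h) else none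
      | _, _ => none
    else none
  else none

-- A's loop over the separator list, with its early return
def ppsLoop (t : List Char) : List Char → Option (Int × Int)
  | [] => none
  | sep :: rest =>
    match ppsTry t sep with
    | some r => some r
    | none => ppsLoop t rest

def parse_pixel_size (size : String) (default_width : Int) (default_height : Int) : Int × Int :=
  if size = "" then (default_width, default_height)
  else
    let t := PySem.Chars.strip (PySem.Chars.lower size.toList)
    match ppsLoop t ['x', '*'] with
    | some r => r
    | none => (default_width, default_height)

-- ===== PORT B =====
-- one step of B's scan: a separator character closes the current piece, any other is appended to it
def ppsStep (st : List (List Char) × List Char) (ch : Char) : List (List Char) × List Char :=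
  if ch = 'x' ∨ ch = '*' then (st.1 ++ [st.2], []) else (st.1, st.2 ++ [ch])

def parse_pixel_size_alt (size : String) (default_width : Int) (default_height : Int) : Int × Int :=
  if size = "" then (default_width, default_height)
  else
    let t := PySem.Chars.strip (PySem.Chars.lower size.toList)
    let st := t.foldl ppsStep ([], [])
    let parts := st.1 ++ [st.2]
    if parts.length = 2 then
      match pyIntOfChars? (PySem.Chars.strip (parts.getD 0 [])),
            pyIntOfChars? (PySem.Chars.strip (parts.getD 1 [])) with
      | some w, some h => if w > 0 ∧ h > 0 then (w, h) else (default_width, default_height)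
      | _, _ => (default_width, default_height)
    else (default_width, default_height)

-- ===== PRECONDITION & SPEC =====
def Spec_parse_pixel_size (size : String) (default_width : Int) (default_height : Int) (out : Int × Int) : Prop := out = parse_pixel_size_alt size default_width default_height
instance (size : String) (default_width : Int) (default_height : Int) (out : Int × Int) : Decidable (Spec_parse_pixel_size size default_width default_height out) := by unfold Spec_parse_pixel_size; infer_instance

-- ===== CLAIM (what is proved, stated in full; the proofs are below) =====
def Claim_equal_parse_pixel_size : Prop := ∀ (size : String) (default_width : Int) (default_height : Int), Dom_parse_pixel_size size default_width default_height → Spec_parse_pixel_size size default_width default_height (parse_pixel_size size default_width default_height)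

-- ===== LEMMAS AND PROOFS =====

-- reference splitter: cut the list at every char satisfying p (one piece more than cuts)
def splitP (p : Char → Bool) : List Char → List (List Char)
  | [] => [[]]
  | c :: l =>
    if p c then [] :: splitP p l
    else
      match splitP p l with
      | [] => [[c]]
      | q :: qs => (c :: q) :: qs

-- the tail computation both ports share, abstracted over the list of pieces
def attempt (parts : List (List Char)) : Option (Int × Int) :=
  if parts.length = 2 then
    match pyIntOfChars? (PySem.Chars.strip (parts.getD 0 [])),
          pyIntOfChars? (PySem.Chars.strip (parts.getD 1 [])) with
    | some w, some h => if w > 0 ∧ h > 0 then some (w, h) else none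
    | _, _ => none
  else none

theorem splitP_ne_nil (p : Char → Bool) (l : List Char) : splitP p l ≠ [] := by
  cases l with
  | nil => simp [splitP]
  | cons c l =>
    simp only [splitP]
    split
    · simp
    · split <;> simp

theorem splitP_cons_pos (p : Char → Bool) (a : Char) (l : List Char) (h : p a = true) :
    splitP p (a :: l) = [] :: splitP p l := by simp [splitP, h]

theorem splitP_cons_neg (p : Char → Bool) (a : Char) (l : List Char) (h : p a = false) :
    splitP p (a :: l) = match splitP p l with | [] => [[a]] | q :: qs => (a :: q) :: qs := by
  simp [splitP, h]

theorem splitP_go (c : Char) (fuel : Nat) : ∀ (l cur : List Char) (accs : List (List Char)),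
    l.length ≤ fuel →
    PySem.Chars.splitOn.go [c] fuel l cur accs =
      accs.reverse ++ (match splitP (· == c) l with
        | [] => [cur.reverse]
        | q :: qs => (cur.reverse ++ q) :: qs) := by
  induction fuel with
  | zero =>
    intro l cur accs hl
    have : l = [] := List.eq_nil_of_length_eq_zero (by omega)
    subst this
    simp [PySem.Chars.splitOn.go, splitP]
  | succ fuel ih =>
    intro l cur accs hl
    cases l with
    | nil => simp [PySem.Chars.splitOn.go, splitP]
    | cons a rest =>
      by_cases hac : a = c
      · subst hac
        have hpre : List.isPrefixOf [a] (a :: rest) = true := by simp [List.isPrefixOf]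
        rw [PySem.Chars.splitOn.go, if_pos hpre]
        rw [ih (List.drop [a].length (a :: rest)) [] _ (by simp at hl ⊢; omega)]
        rcases hs : splitP (· == a) rest with _ | ⟨q, qs⟩
        · exact absurd hs (splitP_ne_nil _ rest)
        · simp [splitP, hs]
      · have hpre : List.isPrefixOf [c] (a :: rest) = false := by
          simp [List.isPrefixOf]; exact fun h => absurd h.symm hac
        rw [PySem.Chars.splitOn.go, hpre]
        rw [ih rest (a :: cur) accs (by simp at hl ⊢; omega)]
        have hca : (a == c) = false := by simp [hac]
        rcases hs : splitP (· == c) rest with _ | ⟨q, qs⟩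
        · exact absurd hs (splitP_ne_nil _ rest)
        · simp [splitP, hs, hca]

theorem splitOn_eq_splitP (t : List Char) (c : Char) :
    PySem.Chars.splitOn t [c] = splitP (· == c) t := by
  unfold PySem.Chars.splitOn
  rw [splitP_go c (t.length + 1) t [] [] (by omega)]
  rcases hs : splitP (· == c) t with _ | ⟨q, qs⟩
  · exact absurd hs (splitP_ne_nil _ t)
  · simp

theorem foldl_scan (l : List Char) : ∀ (ps : List (List Char)) (cur : List Char),
    (l.foldl ppsStep (ps, cur)).1 ++ [(l.foldl ppsStep (ps, cur)).2] =
      ps ++ (match splitP (fun ch => decide (ch = 'x' ∨ ch = '*')) l with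
        | [] => [cur]
        | q :: qs => (cur ++ q) :: qs) := by
  induction l with
  | nil => intro ps cur; simp [splitP]
  | cons a l ih =>
    intro ps cur
    by_cases ha : a = 'x' ∨ a = '*'
    · rw [List.foldl_cons, show ppsStep (ps, cur) a = (ps ++ [cur], []) from by simp [ppsStep, ha]]
      rw [ih (ps ++ [cur]) []]
      rw [splitP_cons_pos _ _ _ (by simpa using ha)]
      rcases hs : splitP (fun ch => decide (ch = 'x' ∨ ch = '*')) l with _ | ⟨q, qs⟩
      · exact absurd hs (splitP_ne_nil _ l)
      · simp
    · rw [List.foldl_cons, show ppsStep (ps, cur) a = (ps, cur ++ [a]) from by simp [ppsStep, ha]]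
      rw [ih ps (cur ++ [a])]
      rw [splitP_cons_neg _ _ _ (by simpa using ha)]
      rcases hs : splitP (fun ch => decide (ch = 'x' ∨ ch = '*')) l with _ | ⟨q, qs⟩
      · exact absurd hs (splitP_ne_nil _ l)
      · simp

theorem splitP_length (p : Char → Bool) (l : List Char) :
    (splitP p l).length = l.countP p + 1 := by
  induction l with
  | nil => simp [splitP]
  | cons c l ih =>
    simp only [splitP, List.countP_cons]
    split
    · rename_i h; simp [ih]
    · rename_i h
      rcases hs : splitP p l with _ | ⟨q, qs⟩
      · exact absurd hs (splitP_ne_nil p l)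
      · simp [← ih, hs]

theorem splitP_congr (p q : Char → Bool) (l : List Char) (h : ∀ c ∈ l, p c = q c) :
    splitP p l = splitP q l := by
  induction l with
  | nil => rfl
  | cons c l ih =>
    have hc := h c (by simp)
    have ih' := ih (fun d hd => h d (by simp [hd]))
    simp only [splitP, hc, ih']

theorem splitP_piece (p : Char → Bool) (l : List Char) (c : Char) (hc : p c = false)
    (h : c ∈ l) : ∃ q ∈ splitP p l, c ∈ q := by
  induction l with
  | nil => simp at h
  | cons a l ih =>
    rcases List.mem_cons.mp h with rfl | h2
    · simp only [splitP, hc]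
      rcases hs : splitP p l with _ | ⟨q, qs⟩
      · exact absurd hs (splitP_ne_nil p l)
      · exact ⟨c :: q, by simp⟩
    · rcases ih h2 with ⟨q, hq, hcq⟩
      simp only [splitP]
      split
      · exact ⟨q, by simp [hq], hcq⟩
      · rcases hs : splitP p l with _ | ⟨q', qs'⟩
        · exact absurd hs (splitP_ne_nil p l)
        · rw [hs] at hq
          rcases List.mem_cons.mp hq with rfl | hq2
          · exact ⟨a :: q, by simp, by simp [hcq]⟩
          · exact ⟨q, by simp [hq2], hcq⟩

theorem countP_xor_split (l : List Char) :
    l.countP (fun ch => decide (ch = 'x' ∨ ch = '*')) =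
      l.countP (· == 'x') + l.countP (· == '*') := by
  induction l with
  | nil => rfl
  | cons c l ih =>
    simp only [List.countP_cons, ih]
    by_cases hx : c = 'x'
    · subst hx; simp; omega
    · by_cases hs : c = '*'
      · subst hs; simp; omega
      · simp [hx, hs]

theorem isIn_singleton (c : Char) (t : List Char) :
    PySem.Chars.isIn [c] t = true ↔ c ∈ t := by
  rw [PySem.Chars.isIn_iff_infix]
  constructor
  · intro h; exact h.mem (by simp)
  · intro h
    rcases List.append_of_mem h with ⟨s1, s2, rfl⟩
    exact ⟨s1, s2, by simp⟩

theorem mem_dropWhile {α : Type} (p : α → Bool) (l : List α) (c : α) (hc : p c = false)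
    (h : c ∈ l) : c ∈ l.dropWhile p := by
  induction l with
  | nil => simp at h
  | cons a t ih =>
    by_cases ha : p a = true
    · rw [List.dropWhile_cons_of_pos ha]
      rcases List.mem_cons.mp h with rfl | h2
      · rw [ha] at hc; cases hc
      · exact ih h2
    · rw [List.dropWhile_cons_of_neg (by simpa using ha)]; exact h

theorem mem_strip (c : Char) (l : List Char) (hc : PySem.Chars.isspace c = false)
    (h : c ∈ l) : c ∈ PySem.Chars.strip l := by
  unfold PySem.Chars.strip PySem.Chars.rstrip PySem.Chars.lstrip
  rw [List.mem_reverse]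
  exact mem_dropWhile _ _ _ hc (by rw [List.mem_reverse]; exact mem_dropWhile _ _ _ hc h)

theorem pyIntGo_cons (a : Char) (rest : List Char) (b : Bool) (acc : Nat) :
    pyIntGo (a :: rest) b acc =
      if a.isDigit = true then pyIntGo rest true (acc * 10 + (a.toNat - '0'.toNat))
      else
        if a = '_' ∧ b = true then
          match rest with
          | d :: _tail => if d.isDigit = true then pyIntGo rest false acc else none
          | [] => none
        else none := rfl

theorem pyIntGo_none (c : Char) (hd : c.isDigit = false) (hu : c ≠ '_') :
    ∀ (l : List Char) (b : Bool) (acc : Nat), c ∈ l → pyIntGo l b acc = none := by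
  intro l
  induction l with
  | nil => intro b acc h; simp at h
  | cons a rest ih =>
    intro b acc h
    by_cases ha : a.isDigit = true
    · rw [pyIntGo_cons, if_pos ha]
      rcases List.mem_cons.mp h with rfl | h2
      · rw [ha] at hd; cases hd
      · exact ih true _ h2
    · rw [pyIntGo_cons, if_neg ha]
      by_cases hb : a = '_' ∧ b = true
      · rw [if_pos hb]
        have h2 : c ∈ rest := by
          rcases List.mem_cons.mp h with rfl | h2
          · exact absurd hb.1 hu
          · exact h2
        rcases rest with _ | ⟨d, tl⟩
        · simp at h2
        · show (if d.isDigit = true then pyIntGo (d :: tl) false acc else none) = none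
          by_cases hdd : d.isDigit = true
          · rw [if_pos hdd]; exact ih false _ h2
          · rw [if_neg hdd]
      · rw [if_neg hb]

theorem pyInt_none_of_bad (c : Char) (hd : c.isDigit = false) (hu : c ≠ '_')
    (hs : PySem.Int.isIntSpace c = false) (hp : c ≠ '+') (hm : c ≠ '-')
    (cs : List Char) (h : c ∈ cs) : pyIntOfChars? cs = none := by
  unfold pyIntOfChars?
  have h1 : c ∈ (List.dropWhile PySem.Int.isIntSpace (List.dropWhile PySem.Int.isIntSpace cs).reverse).reverse := by
    rw [List.mem_reverse]
    exact mem_dropWhile _ _ _ hs (by rw [List.mem_reverse]; exact mem_dropWhile _ _ _ hs h)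
  generalize (List.dropWhile PySem.Int.isIntSpace (List.dropWhile PySem.Int.isIntSpace cs).reverse).reverse = ds at h1 ⊢
  have hdig : ∀ (l : List Char), c ∈ l → pyIntDigits? l = none := by
    intro l hmem
    rcases l with _ | ⟨e, tl⟩
    · simp at hmem
    · rw [pyIntDigits?]
      exact pyIntGo_none c hd hu _ _ _ hmem
  rcases ds with _ | ⟨a, ds1⟩
  · simp at h1
  · show (if a = '-' then (pyIntDigits? ds1).map (fun n => -(n : Int))
        else if a = '+' then (pyIntDigits? ds1).map (fun n => (n : Int))
        else (pyIntDigits? (a :: ds1)).map (fun n => (n : Int))) = none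
    by_cases ha : a = '-'
    · rw [if_pos ha]
      subst ha
      rw [hdig ds1 (by rcases List.mem_cons.mp h1 with rfl | h2; exacts [absurd rfl hm, h2])]
      rfl
    · rw [if_neg ha]
      by_cases hb : a = '+'
      · rw [if_pos hb]
        subst hb
        rw [hdig ds1 (by rcases List.mem_cons.mp h1 with rfl | h2; exacts [absurd rfl hp, h2])]
        rfl
      · rw [if_neg hb, hdig (a :: ds1) h1]
        rfl

theorem ppsTry_eq (t : List Char) (sep : Char) :
    ppsTry t sep = if PySem.Chars.isIn [sep] t = true then attempt (PySem.Chars.splitOn t [sep]) else none := rfl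

theorem attempt_none_of_conflict (parts : List (List Char)) (c : Char)
    (hd : c.isDigit = false) (hu : c ≠ '_') (hsp : PySem.Chars.isspace c = false)
    (hs : PySem.Int.isIntSpace c = false) (hp : c ≠ '+') (hm : c ≠ '-')
    (hq : ∃ q ∈ parts, c ∈ q) : attempt parts = none := by
  unfold attempt
  split_ifs with hlen
  · rcases parts with _ | ⟨p0, _ | ⟨p1, _ | _⟩⟩ <;> simp at hlen
    rcases hq with ⟨q, hqmem, hcq⟩
    have hnone : pyIntOfChars? (PySem.Chars.strip q) = none :=
      pyInt_none_of_bad c hd hu hs hp hm _ (mem_strip c q hsp hcq)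
    rcases List.mem_cons.mp hqmem with rfl | hq2
    · show (match pyIntOfChars? (PySem.Chars.strip q), pyIntOfChars? (PySem.Chars.strip p1) with
        | some w, some h => if w > 0 ∧ h > 0 then some (w, h) else none
        | _, _ => none) = none
      rw [hnone]
    · rcases List.mem_cons.mp hq2 with rfl | hq3
      · show (match pyIntOfChars? (PySem.Chars.strip p0), pyIntOfChars? (PySem.Chars.strip q) with
          | some w, some h => if w > 0 ∧ h > 0 then some (w, h) else none
          | _, _ => none) = none
        rw [hnone]
        cases pyIntOfChars? (PySem.Chars.strip p0) <;> rfl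
      · simp at hq3
  · rfl

theorem attempt_not_two (parts : List (List Char)) (h : parts.length ≠ 2) :
    attempt parts = none := by
  unfold attempt
  rw [if_neg h]

theorem ppsLoop_two (t : List Char) :
    ppsLoop t ['x', '*'] = (match ppsTry t 'x' with
      | some r => some r
      | none => ppsTry t '*') := by
  show (match ppsTry t 'x' with
      | some r => some r
      | none => match ppsTry t '*' with
        | some r => some r
        | none => ppsLoop t []) = _
  cases ppsTry t 'x' with
  | some r => rfl
  | none => cases ppsTry t '*' <;> rfl

theorem attempt_getD (parts : List (List Char)) (dw dh : Int) :
    (if parts.length = 2 then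
        match pyIntOfChars? (PySem.Chars.strip (parts.getD 0 [])),
              pyIntOfChars? (PySem.Chars.strip (parts.getD 1 [])) with
        | some w, some h => if w > 0 ∧ h > 0 then (w, h) else (dw, dh)
        | _, _ => (dw, dh)
      else (dw, dh)) = (match attempt parts with | some r => r | none => (dw, dh)) := by
  unfold attempt
  split_ifs with hlen
  · cases pyIntOfChars? (PySem.Chars.strip (parts.getD 0 [])) with
    | none => rfl
    | some w =>
      cases pyIntOfChars? (PySem.Chars.strip (parts.getD 1 [])) with
      | none => rfl
      | some h =>
        show (if w > 0 ∧ h > 0 then (w, h) else (dw, dh)) =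
          (match (if w > 0 ∧ h > 0 then some (w, h) else none : Option (Int × Int)) with
            | some r => r
            | none => (dw, dh))
        split_ifs <;> rfl
  · rfl

theorem A_body (size : String) (dw dh : Int) (h : ¬ size = "") :
    parse_pixel_size size dw dh =
      (match ppsLoop (PySem.Chars.strip (PySem.Chars.lower size.toList)) ['x', '*'] with
        | some r => r
        | none => (dw, dh)) := by
  unfold parse_pixel_size
  rw [if_neg h]

theorem B_body (size : String) (dw dh : Int) (h : ¬ size = "") :
    parse_pixel_size_alt size dw dh =
      (match attempt (splitP (fun ch => decide (ch = 'x' ∨ ch = '*'))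
          (PySem.Chars.strip (PySem.Chars.lower size.toList))) with
        | some r => r
        | none => (dw, dh)) := by
  unfold parse_pixel_size_alt
  rw [if_neg h]
  have hsplit : ((PySem.Chars.strip (PySem.Chars.lower size.toList)).foldl ppsStep ([], [])).1 ++
      [((PySem.Chars.strip (PySem.Chars.lower size.toList)).foldl ppsStep ([], [])).2] =
      splitP (fun ch => decide (ch = 'x' ∨ ch = '*')) (PySem.Chars.strip (PySem.Chars.lower size.toList)) := by
    rw [foldl_scan]
    rcases hs : splitP (fun ch => decide (ch = 'x' ∨ ch = '*')) (PySem.Chars.strip (PySem.Chars.lower size.toList)) with _ | ⟨q, qs⟩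
    · exact absurd hs (splitP_ne_nil _ _)
    · simp
  show (if (((PySem.Chars.strip (PySem.Chars.lower size.toList)).foldl ppsStep ([], [])).1 ++
        [((PySem.Chars.strip (PySem.Chars.lower size.toList)).foldl ppsStep ([], [])).2]).length = 2 then _ else _) = _
  rw [hsplit, attempt_getD]

theorem key (t : List Char) :
    ppsLoop t ['x', '*'] = attempt (splitP (fun ch => decide (ch = 'x' ∨ ch = '*')) t) := by
  rw [ppsLoop_two, ppsTry_eq, ppsTry_eq, splitOn_eq_splitP, splitOn_eq_splitP]
  by_cases hx : 'x' ∈ t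
  · by_cases hst : '*' ∈ t
    · rw [if_pos ((isIn_singleton _ _).mpr hx), if_pos ((isIn_singleton _ _).mpr hst)]
      have hax : attempt (splitP (· == 'x') t) = none :=
        attempt_none_of_conflict _ '*' (by decide) (by decide) (by decide) (by decide) (by decide) (by decide)
          (splitP_piece _ _ _ (by decide) hst)
      have has : attempt (splitP (· == '*') t) = none :=
        attempt_none_of_conflict _ 'x' (by decide) (by decide) (by decide) (by decide) (by decide) (by decide)
          (splitP_piece _ _ _ (by decide) hx)
      have hab : attempt (splitP (fun ch => decide (ch = 'x' ∨ ch = '*')) t) = none := by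
        apply attempt_not_two
        rw [splitP_length, countP_xor_split]
        have h1 : 0 < t.countP (· == 'x') := List.countP_pos_iff.mpr ⟨'x', hx, by decide⟩
        have h2 : 0 < t.countP (· == '*') := List.countP_pos_iff.mpr ⟨'*', hst, by decide⟩
        omega
      rw [hax, has, hab]
    · rw [if_pos ((isIn_singleton _ _).mpr hx),
        if_neg (fun hh => hst ((isIn_singleton _ _).mp hh))]
      have hcong : splitP (· == 'x') t = splitP (fun ch => decide (ch = 'x' ∨ ch = '*')) t :=
        splitP_congr _ _ t (fun c hc => by
          by_cases h : c = '*'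
          · exact absurd (h ▸ hc) hst
          · rw [show (c == 'x') = decide (c = 'x') from rfl]; simp [h])
      rw [hcong]
      cases attempt (splitP (fun ch => decide (ch = 'x' ∨ ch = '*')) t) <;> rfl
  · by_cases hst : '*' ∈ t
    · rw [if_neg (fun hh => hx ((isIn_singleton _ _).mp hh)),
        if_pos ((isIn_singleton _ _).mpr hst)]
      have hcong : splitP (· == '*') t = splitP (fun ch => decide (ch = 'x' ∨ ch = '*')) t :=
        splitP_congr _ _ t (fun c hc => by
          by_cases h : c = 'x'
          · exact absurd (h ▸ hc) hx
          · rw [show (c == '*') = decide (c = '*') from rfl]; simp [h])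
      rw [hcong]
    · rw [if_neg (fun hh => hx ((isIn_singleton _ _).mp hh)),
        if_neg (fun hh => hst ((isIn_singleton _ _).mp hh))]
      symm
      apply attempt_not_two
      rw [splitP_length]
      have h0 : t.countP (fun ch => decide (ch = 'x' ∨ ch = '*')) = 0 := by
        rw [List.countP_eq_zero]
        intro a ha
        simp only [decide_eq_true_eq]
        rintro (rfl | rfl)
        · exact hx ha
        · exact hst ha
      omega

-- ===== VERDICT (by name: the statement is the Claim_ definition above) =====
theorem parse_pixel_size_spec : Claim_equal_parse_pixel_size := by
  intro size dw dh _
  unfold Spec_parse_pixel_size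
  by_cases hsz : size = ""
  · unfold parse_pixel_size parse_pixel_size_alt
    rw [if_pos hsz, if_pos hsz]
  · rw [A_body _ _ _ hsz, B_body _ _ _ hsz, key]
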